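-- pv_equiv track=rewrite | github.com/AYEOOON/Algorithm | 프로그래머스/Python/4단계/[2021 KAKAO BLIND RECRUITMENT] - 매출 하락 최소화.py | solution
-- ===== SOURCE A (Python) =====
-- from collections import defaultdict
--
-- def solution(sales, links):
--     n = len(sales)
--     tree = defaultdict(list)
--
--     # 트리 구조 생성
--     for a, b in links:
--         tree[a].append(b)
--
--     # DP 테이블 초기화
--     # dp[i][0]: i번 노드가 불참했을 때의 최소 비용
--     # dp[i][1]: i번 노드가 참석했을 때의 최소 비용
--     dp = [[0, 0] for _ in range(n + 1)]
--     visited = [False] * (n + 1)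
--
--     def dfs(node):
--         visited[node] = True
--         dp[node][1] = sales[node - 1]  # 현재 노드가 참석할 경우 본인의 비용
--
--         # 리프 노드는 자식이 없으므로 return
--         if not tree[node]:
--             return
--
--         cost = float('inf')           # 자식 중 하나를 참석시키기 위한 추가 비용
--         is_all_child_opt_out = True   # 모든 자식이 불참했는지 여부 체크
--
--         for child in tree[node]:
--             dfs(child)  # 자식 먼저 처리
--
--             # 현재 노드가 참석할 경우: 자식은 참석/불참 중 더 작은 비용 선택 가능
--             dp[node][1] += min(dp[child][0], dp[child][1])
--
--             # 현재 노드가 불참할 경우: 자식도 모두 불참이면 안 됨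
--             dp[node][0] += min(dp[child][0], dp[child][1])
--
--             # 자식 중 하나라도 참석하면 조건 만족
--             if dp[child][0] > dp[child][1]:
--                 is_all_child_opt_out = False
--
--             # 불참한 자식만 있을 경우, 참석한 자식 하나를 강제로 선택해야 하므로 비용 계산
--             cost = min(cost, dp[child][1] - dp[child][0])
--
--         # 자식이 모두 불참한 경우 -> 예외 처리: 자식 하나는 반드시 참석시켜야 함
--         if is_all_child_opt_out:
--             dp[node][0] += cost
--
--     # 1번이 루트 노드
--     dfs(1)
--
--     # 루트 노드가 참석/불참 중 더 작은 비용을 선택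
--     return min(dp[1][0], dp[1][1])
-- ===== SOURCE B (Python) =====
-- def solution(sales, links):
--     children = {}
--     for a, b in links:
--         children.setdefault(a, []).append(b)
--     # explicit BFS from the root: every node appears before its descendants
--     order = []
--     queue = [1]
--     while queue:
--         node = queue.pop(0)
--         order.append(node)
--         queue.extend(children.get(node, []))
--     # fill the DP table in reverse order, so children are done before parents
--     dp = {}
--     for node in reversed(order):
--         cs = children.get(node, [])
--         base = sum(min(dp[c][0], dp[c][1]) for c in cs)
--         dp1 = sales[node - 1] + base
--         if cs and all(dp[c][0] <= dp[c][1] for c in cs):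
--             dp0 = base + min(dp[c][1] - dp[c][0] for c in cs)
--         else:
--             dp0 = base
--         dp[node] = (dp0, dp1)
--     return min(dp[1][0], dp[1][1])
-- ===== Notes on version B (the rewrite author's own statement) =====
-- stated objective: alternative
-- what changed: A fills dp via a recursive DFS mutating a shared table; B computes an explicit traversal order of the tree rooted at 1 with an iterative queue loop and then fills the same dp values in one reverse sweep over that order, with no recursion.
-- outside the precondition, e.g. on solution([5, 3, -2], [[1, 2], [2, 3], [1, 2]]): A returns -3, B returns -1; on solution([-1], [[1, 0], [2, 0]]): A returns -2, B returns -2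
import Mathlib
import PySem

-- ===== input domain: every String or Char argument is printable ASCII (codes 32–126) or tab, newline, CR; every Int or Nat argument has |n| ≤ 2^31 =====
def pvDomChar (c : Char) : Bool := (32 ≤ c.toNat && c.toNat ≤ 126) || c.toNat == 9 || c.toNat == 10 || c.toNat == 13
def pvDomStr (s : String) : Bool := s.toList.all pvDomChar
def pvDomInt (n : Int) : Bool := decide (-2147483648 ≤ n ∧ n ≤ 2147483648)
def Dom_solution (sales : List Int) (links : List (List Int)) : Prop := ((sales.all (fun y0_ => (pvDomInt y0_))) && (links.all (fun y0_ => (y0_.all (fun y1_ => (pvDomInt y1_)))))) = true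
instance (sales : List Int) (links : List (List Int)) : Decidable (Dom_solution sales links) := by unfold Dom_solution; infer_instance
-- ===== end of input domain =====

-- B replaces A's recursive DFS over a mutable global dp table by an explicit
-- BFS order plus a reverse sweep filling the dp table iteratively (alternative
-- decomposition, no recursion); equal return value on all inputs in Pre_.


-- ===== PORT A =====
-- sales[node - 1] (exact on Pre_: 1 ≤ node ≤ len(sales), so no IndexError / wraparound)
def pvSales (sales : List Int) (node : Int) : Int :=
  (PySem.List.pyGet? sales (node - 1)).getD 0

-- write one entry of the dp table (modelled as a total function)
def pvUpd (dp : Int → Int × Int) (k : Int) (v : Int × Int) : Int → Int × Int :=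
  fun x => if x = k then v else dp x

-- one step of "for a, b in links: tree[a].append(b)"
def pvTreeStep (t : Int → List Int) (l : List Int) : Int → List Int :=
  match l with
  | [a, b] => fun x => if x = a then t x ++ [b] else t x
  | _ => t

def pvTreeA (links : List (List Int)) : Int → List Int :=
  links.foldl pvTreeStep (fun _ => [])

-- body of A's "for child in tree[node]" loop; state = (dp, cost, is_all_child_opt_out)
def pvFoldStep (node : Int) (rec : Int → (Int → Int × Int) → (Int → Int × Int))
    (st : (Int → Int × Int) × Option Int × Bool) (child : Int) :
    (Int → Int × Int) × Option Int × Bool :=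
  let dp := rec child st.1
  let m := min (dp child).1 (dp child).2
  let dp2 := pvUpd dp node ((dp node).1 + m, (dp node).2 + m)
  let allOut := if (dp2 child).1 > (dp2 child).2 then false else st.2.2
  let cost := match st.2.1 with
    | none => some ((dp2 child).2 - (dp2 child).1)
    | some c => some (min c ((dp2 child).2 - (dp2 child).1))
  (dp2, cost, allOut)

-- A's dfs; fuel (enough on Pre_, where depth ≤ len(sales)) makes it total.
-- cost = float('inf') is modelled as none (it is replaced on the first child).
def pvDfsA (sales : List Int) (tree : Int → List Int) :
    Nat → Int → (Int → Int × Int) → (Int → Int × Int)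
  | 0, _, dp => dp
  | fuel + 1, node, dp =>
    let dp1 := pvUpd dp node ((dp node).1, pvSales sales node)
    let cs := tree node
    if cs = [] then dp1
    else
      let st := cs.foldl (pvFoldStep node (fun c d => pvDfsA sales tree fuel c d)) (dp1, none, true)
      if st.2.2 then pvUpd st.1 node ((st.1 node).1 + st.2.1.getD 0, (st.1 node).2) else st.1

def solution (sales : List Int) (links : List (List Int)) : Int :=
  let tree := pvTreeA links
  let dp := pvDfsA sales tree (sales.length + 1) 1 (fun _ => (0, 0))
  min (dp 1).1 (dp 1).2

-- ===== PORT B =====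
def pvTreeB (links : List (List Int)) : Int → List Int :=
  links.foldl pvTreeStep (fun _ => [])

-- "while queue: node = queue.pop(0); order.append(node); queue.extend(children.get(node, []))"
def pvBfs (tree : Int → List Int) : Nat → List Int → List Int → List Int
  | 0, _, acc => acc
  | _ + 1, [], acc => acc
  | fuel + 1, node :: rest, acc => pvBfs tree fuel (rest ++ tree node) (acc ++ [node])

-- min of a nonempty generator (the [] case is unreachable where it is used)
def pvMinL : List Int → Int
  | [] => 0
  | x :: xs => xs.foldl min x

-- body of B's "for node in reversed(order)" loop
def pvStepB (sales : List Int) (tree : Int → List Int)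
    (dp : Int → Int × Int) (node : Int) : Int → Int × Int :=
  let cs := tree node
  let base := (cs.map (fun c => min (dp c).1 (dp c).2)).sum
  let dp1 := pvSales sales node + base
  let dp0 :=
    if cs ≠ [] ∧ cs.all (fun c => (dp c).1 ≤ (dp c).2) then
      base + pvMinL (cs.map (fun c => (dp c).2 - (dp c).1))
    else base
  pvUpd dp node (dp0, dp1)

def solution_alt (sales : List Int) (links : List (List Int)) : Int :=
  let tree := pvTreeB links
  let order := pvBfs tree (links.length + 1) [1] []
  let dp := order.reverse.foldl (pvStepB sales tree) (fun _ => (0, 0))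
  min (dp 1).1 (dp 1).2

-- ===== PRECONDITION & SPEC =====
-- Pre_ excludes inputs where A raises (empty sales: IndexError; malformed links:
-- ValueError; cyclic reachable links: RecursionError) and non-tree link lists —
-- a node with two parents / a duplicate edge, an edge into the root 1, or a link
-- target outside 1..len(sales) — on which the tree DP is unspecified and A's
-- revisiting dfs returns accidental accumulated-state values; when some link starts
-- at node 1 this also excludes such malformed links that are unreachable from 1
-- (a stated simplification: A returns there, and B returns the same value).
def Pre_solution (sales : List Int) (links : List (List Int)) : Prop :=
  sales ≠ [] ∧ (∀ l ∈ links, l.length = 2) ∧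
  ((∀ l ∈ links, l.getD 0 0 ≠ 1) ∨
   ((∀ l ∈ links, 1 ≤ l.getD 1 0 ∧ l.getD 1 0 ≤ (sales.length : Int) ∧ l.getD 1 0 ≠ 1) ∧
    (links.map (fun l => l.getD 1 0)).Nodup))

instance (sales : List Int) (links : List (List Int)) : Decidable (Pre_solution sales links) := by
  unfold Pre_solution; infer_instance

def pvWitness_solution : List Int × List (List Int) := ([5, 4, 3], [[1, 2], [1, 3]])

def Spec_solution (sales : List Int) (links : List (List Int)) (out : Int) : Prop := out = solution_alt sales links
instance (sales : List Int) (links : List (List Int)) (out : Int) : Decidable (Spec_solution sales links out) := by unfold Spec_solution; infer_instance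

-- ===== CLAIM (what is proved, stated in full; the proofs are below) =====
def Claim_equal_solution : Prop := ∀ (sales : List Int) (links : List (List Int)), Dom_solution sales links → Pre_solution sales links → Spec_solution sales links (solution sales links)

-- ===== LEMMAS AND PROOFS =====

-- the value spec both ports compute: a pure tree DP, by fuel recursion
def pvG (sales : List Int) (tree : Int → List Int) : Nat → Int → Int × Int
  | 0, _ => (0, 0)
  | f + 1, node =>
    let cs := tree node
    let vals := cs.map (fun c => pvG sales tree f c)
    let base := (vals.map (fun p => min p.1 p.2)).sum
    if cs = [] then (0, pvSales sales node)
    else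
      (base + (if vals.all (fun p => p.1 ≤ p.2) then pvMinL (vals.map (fun p => p.2 - p.1)) else 0),
       pvSales sales node + base)

-- nodes reachable from `node` (fuel-bounded)
def pvReach (tree : Int → List Int) : Nat → Int → List Int
  | 0, _ => []
  | f + 1, node => node :: (tree node).flatMap (fun c => pvReach tree f c)

-- walks: pvWStep tree a t v means t is a step list of tree-edges from a ending at v
def pvWStep (tree : Int → List Int) : Int → List Int → Int → Prop
  | a, [], v => v = a
  | a, b :: t, v => b ∈ tree a ∧ pvWStep tree b t v

-- children lists are duplicate-free and every node has at most one parent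
def pvUniq (tree : Int → List Int) : Prop :=
  (∀ x, (tree x).Nodup) ∧ ∀ x y c, c ∈ tree x → c ∈ tree y → x = y

def pvPick (x : Int) (l : List Int) : Option Int :=
  match l with | [a, b] => if a = x then some b else none | _ => none

lemma pvTree_go (links : List (List Int)) (t : Int → List Int) (x : Int) :
    (links.foldl pvTreeStep t) x = t x ++ links.filterMap (pvPick x) := by
  induction links generalizing t with
  | nil => simp
  | cons l ls ih =>
    rw [List.foldl_cons, ih, List.filterMap_cons]
    rcases l with _ | ⟨a, _ | ⟨b, _ | ⟨c, l⟩⟩⟩ <;>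
      simp only [pvTreeStep, pvPick] <;> try rfl
    by_cases h : a = x
    · subst h; simp
    · have h' : x ≠ a := fun hh => h hh.symm
      simp [h, h']

lemma pvPick_eq_some (x c : Int) (l : List Int) (h : pvPick x l = some c) : l = [x, c] := by
  rcases l with _ | ⟨a, _ | ⟨b, _ | ⟨d, l⟩⟩⟩ <;> simp [pvPick] at h
  rcases h with ⟨h1, h2⟩
  simp [h1, h2]

lemma pvMem_tree (links : List (List Int)) (x c : Int) :
    c ∈ pvTreeA links x ↔ [x, c] ∈ links := by
  unfold pvTreeA
  rw [pvTree_go]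
  simp only [List.nil_append, List.mem_filterMap]
  constructor
  · rintro ⟨l, hl, hp⟩
    have := pvPick_eq_some x c l hp
    subst this; exact hl
  · intro h
    exact ⟨[x, c], h, by simp [pvPick]⟩

lemma pvReach_succ (tree : Int → List Int) (f : Nat) (node : Int) :
    pvReach tree (f + 1) node = node :: (tree node).flatMap (fun c => pvReach tree f c) := rfl

-- ===== walk lemmas =====
lemma pvWStep_append (tree : Int → List Int) :
    ∀ (t : List Int) (a v : Int), pvWStep tree a t v →
      ∀ (s : List Int) (w : Int), pvWStep tree v s w → pvWStep tree a (t ++ s) w := by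
  intro t
  induction t with
  | nil =>
    intro a v h s w hs
    have : v = a := h
    subst this
    simpa using hs
  | cons b t' ih =>
    intro a v h s w hs
    exact ⟨h.1, ih b v h.2 s w hs⟩

lemma pvWStep_snoc (tree : Int → List Int) :
    ∀ (t : List Int) (a b v : Int),
      pvWStep tree a (t ++ [b]) v ↔ (v = b ∧ ∃ p, pvWStep tree a t p ∧ b ∈ tree p) := by
  intro t
  induction t with
  | nil =>
    intro a b v
    constructor
    · rintro ⟨hb, hv⟩
      have : v = b := hv
      exact ⟨this, a, rfl, hb⟩
    · rintro ⟨hv, p, hp, hb⟩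
      have : p = a := hp
      subst this
      exact ⟨hb, hv⟩
  | cons c t' ih =>
    intro a b v
    constructor
    · rintro ⟨hc, hrest⟩
      obtain ⟨hv, p, hp, hb⟩ := (ih c b v).mp hrest
      exact ⟨hv, p, ⟨hc, hp⟩, hb⟩
    · rintro ⟨hv, p, ⟨hc, hp⟩, hb⟩
      exact ⟨hc, (ih c b v).mpr ⟨hv, p, hp, hb⟩⟩

lemma pvWStep_take (tree : Int → List Int) :
    ∀ (t : List Int) (a v : Int), pvWStep tree a t v →
      ∀ i : Nat, pvWStep tree a (t.take i) ((t.take i).getLastD a) := by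
  intro t
  induction t with
  | nil => intro a v _ i; simp [pvWStep]
  | cons b t' ih =>
    intro a v h i
    cases i with
    | zero => simp [pvWStep]
    | succ j =>
      rw [List.take_succ_cons, List.getLastD_cons]
      exact ⟨h.1, ih b v h.2 j⟩

lemma pvWStep_range (tree : Int → List Int) (n : Int)
    (hT : ∀ x c, c ∈ tree x → 1 ≤ c ∧ c ≤ n ∧ c ≠ 1) (hn : 1 ≤ n) :
    ∀ (t : List Int) (v : Int), pvWStep tree 1 t v → 1 ≤ v ∧ v ≤ n := by
  intro t v h
  cases t using List.reverseRecOn with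
  | nil =>
    have : v = 1 := h
    subst this
    exact ⟨le_refl 1, hn⟩
  | append_singleton t' b =>
    obtain ⟨rfl, p, _, hb⟩ := (pvWStep_snoc tree t' 1 b v).mp h
    exact ⟨(hT p v hb).1, (hT p v hb).2.1⟩

lemma pvWalk_eq_nil (tree : Int → List Int) (n : Int)
    (hT : ∀ x c, c ∈ tree x → 1 ≤ c ∧ c ≤ n ∧ c ≠ 1) :
    ∀ (t : List Int), pvWStep tree 1 t 1 → t = [] := by
  intro t h
  cases t using List.reverseRecOn with
  | nil => rfl
  | append_singleton t' b =>
    obtain ⟨hv, p, _, hb⟩ := (pvWStep_snoc tree t' 1 b 1).mp h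
    exact absurd hv.symm (hT p b hb).2.2

lemma pvWalk_unique (tree : Int → List Int) (n : Int)
    (hT : ∀ x c, c ∈ tree x → 1 ≤ c ∧ c ≤ n ∧ c ≠ 1) (hU : pvUniq tree) :
    ∀ (k : Nat) (t₁ t₂ : List Int) (v : Int), t₁.length ≤ k →
      pvWStep tree 1 t₁ v → pvWStep tree 1 t₂ v → t₁ = t₂ := by
  intro k
  induction k with
  | zero =>
    intro t₁ t₂ v hk h1 h2
    have ht1 : t₁ = [] := List.eq_nil_of_length_eq_zero (by omega)
    subst ht1
    have hv : v = 1 := h1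
    subst hv
    exact (pvWalk_eq_nil tree n hT t₂ h2).symm
  | succ k ih =>
    intro t₁ t₂ v hk h1 h2
    cases t₁ using List.reverseRecOn with
    | nil =>
      have hv : v = 1 := h1
      subst hv
      exact (pvWalk_eq_nil tree n hT t₂ h2).symm
    | append_singleton t₁' b₁ =>
      obtain ⟨rfl, p₁, hp₁, hb₁⟩ := (pvWStep_snoc tree t₁' 1 b₁ v).mp h1
      cases t₂ using List.reverseRecOn with
      | nil =>
        have hv : v = 1 := h2
        exact absurd hv (hT p₁ v hb₁).2.2
      | append_singleton t₂' b₂ =>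
        obtain ⟨hb, p₂, hp₂, hb₂⟩ := (pvWStep_snoc tree t₂' 1 b₂ v).mp h2
        have hbb : b₂ ∈ tree p₂ := hb₂
        have hvp2 : v ∈ tree p₂ := by rw [hb]; exact hbb
        have hpp : p₁ = p₂ := hU.2 p₁ p₂ v hb₁ hvp2
        have hlen : t₁'.length ≤ k := by
          simp only [List.length_append, List.length_singleton] at hk; omega
        have := ih t₁' t₂' p₁ hlen hp₁ (by rw [hpp]; exact hp₂)
        rw [this, hb]

lemma pvDepth_le (tree : Int → List Int) (n : Int)
    (hT : ∀ x c, c ∈ tree x → 1 ≤ c ∧ c ≤ n ∧ c ≠ 1) (hU : pvUniq tree) (hn : 1 ≤ n) :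
    ∀ (t : List Int) (v : Int), pvWStep tree 1 t v → (t.length : Int) ≤ n - 1 := by
  intro t v hw
  have hwalki : ∀ i : Nat, pvWStep tree 1 (t.take i) ((t.take i).getLastD 1) :=
    fun i => pvWStep_take tree t 1 v hw i
  have hmaps : ∀ i ∈ Finset.range (t.length + 1),
      (fun i : Nat => (t.take i).getLastD 1) i ∈ Finset.Icc (1 : Int) n := by
    intro i _
    have := pvWStep_range tree n hT hn (t.take i) _ (hwalki i)
    exact Finset.mem_Icc.mpr this
  have hinj : Set.InjOn (fun i : Nat => (t.take i).getLastD 1)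
      (Finset.range (t.length + 1)) := by
    intro i hi j hj hij
    simp only [Finset.coe_range, Set.mem_Iio] at hi hj
    have h1 := hwalki i
    have h2 := hwalki j
    rw [show ((t.take j).getLastD 1) = ((t.take i).getLastD 1) from hij.symm] at h2
    have heq := pvWalk_unique tree n hT hU t.length (t.take i) (t.take j) _
      (by rw [List.length_take]; omega) h1 h2
    have := congrArg List.length heq
    rw [List.length_take, List.length_take] at this
    omega
  have hcard := Finset.card_le_card_of_injOn (fun i : Nat => (t.take i).getLastD 1) hmaps hinj
  rw [Finset.card_range, Int.card_Icc] at hcard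
  omega

lemma pvReach_steps (tree : Int → List Int) :
    ∀ (f : Nat) (node v : Int),
      v ∈ pvReach tree f node ↔ ∃ s, pvWStep tree node s v ∧ s.length < f := by
  intro f
  induction f with
  | zero => intro node v; simp [pvReach]
  | succ f ih =>
    intro node v
    rw [pvReach_succ]
    simp only [List.mem_cons, List.mem_flatMap]
    constructor
    · rintro (rfl | ⟨c, hc, hv⟩)
      · exact ⟨[], rfl, Nat.succ_pos _⟩
      · obtain ⟨s, hs, hl⟩ := (ih c v).mp hv
        exact ⟨c :: s, ⟨hc, hs⟩, by simp; omega⟩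
    · rintro ⟨s, hs, hl⟩
      cases s with
      | nil =>
        have : v = node := hs
        exact Or.inl this
      | cons c s' =>
        refine Or.inr ⟨c, hs.1, (ih c v).mpr ⟨s', hs.2, by simp at hl; omega⟩⟩

lemma pvNotSelf (tree : Int → List Int) (n : Int)
    (hT : ∀ x c, c ∈ tree x → 1 ≤ c ∧ c ≤ n ∧ c ≠ 1) (hU : pvUniq tree)
    (t : List Int) (node c : Int) (hw : pvWStep tree 1 t node) (hc : c ∈ tree node)
    (f : Nat) (v : Int) (hv : v ∈ pvReach tree f c) : v ≠ node := by
  intro heq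
  obtain ⟨s, hs, _⟩ := (pvReach_steps tree f c v).mp hv
  have hw2 : pvWStep tree 1 (t ++ c :: s) v :=
    pvWStep_append tree t 1 node hw (c :: s) v ⟨hc, hs⟩
  rw [heq] at hw2
  have heq2 := pvWalk_unique tree n hT hU (t ++ c :: s).length (t ++ c :: s) t node
    (le_refl _) hw2 hw
  have := congrArg List.length heq2
  simp at this

lemma pvDisj (tree : Int → List Int) (n : Int)
    (hT : ∀ x c, c ∈ tree x → 1 ≤ c ∧ c ≤ n ∧ c ≠ 1) (hU : pvUniq tree)
    (t : List Int) (node c₁ c₂ : Int) (f₁ f₂ : Nat) (v : Int)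
    (hw : pvWStep tree 1 t node)
    (hc₁ : c₁ ∈ tree node) (hc₂ : c₂ ∈ tree node) (hne : c₁ ≠ c₂)
    (h₁ : v ∈ pvReach tree f₁ c₁) (h₂ : v ∈ pvReach tree f₂ c₂) : False := by
  obtain ⟨s₁, hs₁, _⟩ := (pvReach_steps tree f₁ c₁ v).mp h₁
  obtain ⟨s₂, hs₂, _⟩ := (pvReach_steps tree f₂ c₂ v).mp h₂
  have hw1 : pvWStep tree 1 (t ++ c₁ :: s₁) v :=
    pvWStep_append tree t 1 node hw (c₁ :: s₁) v ⟨hc₁, hs₁⟩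
  have hw2 : pvWStep tree 1 (t ++ c₂ :: s₂) v :=
    pvWStep_append tree t 1 node hw (c₂ :: s₂) v ⟨hc₂, hs₂⟩
  have heq := pvWalk_unique tree n hT hU (t ++ c₁ :: s₁).length (t ++ c₁ :: s₁)
    (t ++ c₂ :: s₂) v (le_refl _) hw1 hw2
  have := List.append_cancel_left heq
  exact hne (by injection this)

lemma pvWalk_child (tree : Int → List Int) (t : List Int) (node c : Int)
    (hw : pvWStep tree 1 t node) (hc : c ∈ tree node) : pvWStep tree 1 (t ++ [c]) c :=
  pvWStep_append tree t 1 node hw [c] c ⟨hc, rfl⟩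

lemma pvReach_parent (tree : Int → List Int) :
    ∀ (f : Nat) (c v : Int), v ∈ pvReach tree f c →
      v = c ∨ ∃ p, p ∈ pvReach tree f c ∧ v ∈ tree p := by
  intro f
  induction f with
  | zero => intro c v hv; simp [pvReach] at hv
  | succ f ih =>
    intro c v hv
    rw [pvReach_succ] at hv
    rcases List.mem_cons.mp hv with rfl | hv'
    · exact Or.inl rfl
    · obtain ⟨d, hd, hvd⟩ := List.mem_flatMap.mp hv'
      rcases ih d v hvd with rfl | ⟨p, hp, hvp⟩
      · exact Or.inr ⟨c, by rw [pvReach_succ]; exact List.mem_cons_self, hd⟩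
      · refine Or.inr ⟨p, ?_, hvp⟩
        rw [pvReach_succ]
        exact List.mem_cons_of_mem _ (List.mem_flatMap.mpr ⟨d, hd, hp⟩)

lemma pvReach_nodup (tree : Int → List Int) (n : Int)
    (hT : ∀ x c, c ∈ tree x → 1 ≤ c ∧ c ≤ n ∧ c ≠ 1) (hU : pvUniq tree) :
    ∀ (f : Nat) (t : List Int) (node : Int), pvWStep tree 1 t node →
      (pvReach tree f node).Nodup := by
  intro f
  induction f with
  | zero => intro t node _; simp [pvReach]
  | succ f ih =>
    intro t node hw
    rw [pvReach_succ]
    have hsub : ∀ cs : List Int, cs ⊆ tree node → cs.Nodup →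
        (cs.flatMap (fun c => pvReach tree f c)).Nodup := by
      intro cs
      induction cs with
      | nil => simp
      | cons c cs ihc =>
        intro hss hnd
        rw [List.flatMap_cons]
        have hcmem : c ∈ tree node := hss List.mem_cons_self
        refine (ih (t ++ [c]) c (pvWalk_child tree t node c hw hcmem)).append
          (ihc (fun y hy => hss (List.mem_cons_of_mem _ hy)) hnd.of_cons) ?_
        intro v hv hv'
        obtain ⟨c', hc', hvc'⟩ := List.mem_flatMap.mp hv'
        have hcc' : c ≠ c' := by
          rintro rfl
          exact (List.nodup_cons.mp hnd).1 hc'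
        exact pvDisj tree n hT hU t node c c' f f v hw hcmem
          (hss (List.mem_cons_of_mem _ hc')) hcc' hv hvc'
    refine List.nodup_cons.mpr ⟨?_, hsub (tree node) (fun y hy => hy) (hU.1 node)⟩
    intro hmem
    obtain ⟨c, hc, hvc⟩ := List.mem_flatMap.mp hmem
    exact pvNotSelf tree n hT hU t node c hw hc f node hvc rfl

lemma pvReach_stable (tree : Int → List Int) (n : Int)
    (hT : ∀ x c, c ∈ tree x → 1 ≤ c ∧ c ≤ n ∧ c ≠ 1) (hU : pvUniq tree) (hn : 1 ≤ n) :
    ∀ (f : Nat) (t : List Int) (node : Int), pvWStep tree 1 t node →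
      (n - (t.length : Int)).toNat ≤ f →
      pvReach tree (f + 1) node = pvReach tree f node := by
  intro f
  induction f using Nat.strong_induction_on with
  | _ f ih =>
    intro t node hw hf
    have hd := pvDepth_le tree n hT hU hn t node hw
    obtain ⟨f₁, rfl⟩ : ∃ f₁, f = f₁ + 1 := ⟨f - 1, by omega⟩
    rw [pvReach_succ tree (f₁ + 1) node, pvReach_succ tree f₁ node]
    congr 1
    apply List.flatMap_congr
    intro c hc
    exact ih f₁ (by omega) (t ++ [c]) c (pvWalk_child tree t node c hw hc)
      (by simp only [List.length_append, List.length_singleton]; push_cast; omega)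

lemma pvReach_eq_of_le (tree : Int → List Int) (n : Int)
    (hT : ∀ x c, c ∈ tree x → 1 ≤ c ∧ c ≤ n ∧ c ≠ 1) (hU : pvUniq tree) (hn : 1 ≤ n)
    (t : List Int) (node : Int) (hw : pvWStep tree 1 t node) :
    ∀ (f g : Nat), (n - (t.length : Int)).toNat ≤ f → f ≤ g →
      pvReach tree g node = pvReach tree f node := by
  intro f g hf hfg
  have hd := pvDepth_le tree n hT hU hn t node hw
  induction g with
  | zero => omega
  | succ g ih =>
    rcases Nat.lt_or_ge f (g + 1) with h | h
    · have := ih (by omega)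
      rw [← this]
      exact pvReach_stable tree n hT hU hn g t node hw (by omega)
    · have : f = g + 1 := by omega
      subst this; rfl

lemma pvG_succ (sales : List Int) (tree : Int → List Int) (f : Nat) (node : Int) :
    pvG sales tree (f + 1) node =
      (let cs := tree node
       let vals := cs.map (fun c => pvG sales tree f c)
       let base := (vals.map (fun p => min p.1 p.2)).sum
       if cs = [] then (0, pvSales sales node)
       else
         (base + (if vals.all (fun p => p.1 ≤ p.2) then pvMinL (vals.map (fun p => p.2 - p.1)) else 0),
          pvSales sales node + base)) := rfl

lemma pvG_stable (sales : List Int) (tree : Int → List Int) (n : Int)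
    (hT : ∀ x c, c ∈ tree x → 1 ≤ c ∧ c ≤ n ∧ c ≠ 1) (hU : pvUniq tree) (hn : 1 ≤ n) :
    ∀ (f : Nat) (t : List Int) (node : Int), pvWStep tree 1 t node →
      (n - (t.length : Int)).toNat ≤ f →
      pvG sales tree (f + 1) node = pvG sales tree f node := by
  intro f
  induction f using Nat.strong_induction_on with
  | _ f ih =>
    intro t node hw hf
    have hd := pvDepth_le tree n hT hU hn t node hw
    obtain ⟨f₁, rfl⟩ : ∃ f₁, f = f₁ + 1 := ⟨f - 1, by omega⟩
    rw [pvG_succ sales tree (f₁ + 1) node, pvG_succ sales tree f₁ node]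
    have hmap : (tree node).map (fun c => pvG sales tree (f₁ + 1) c)
        = (tree node).map (fun c => pvG sales tree f₁ c) := by
      apply List.map_congr_left
      intro c hc
      exact ih f₁ (by omega) (t ++ [c]) c (pvWalk_child tree t node c hw hc)
        (by simp only [List.length_append, List.length_singleton]; push_cast; omega)
    simp only [hmap]

lemma pvG_eq_of_le (sales : List Int) (tree : Int → List Int) (n : Int)
    (hT : ∀ x c, c ∈ tree x → 1 ≤ c ∧ c ≤ n ∧ c ≠ 1) (hU : pvUniq tree) (hn : 1 ≤ n)
    (t : List Int) (node : Int) (hw : pvWStep tree 1 t node) :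
    ∀ (f g : Nat), (n - (t.length : Int)).toNat ≤ f → f ≤ g →
      pvG sales tree g node = pvG sales tree f node := by
  intro f g hf hfg
  have hd := pvDepth_le tree n hT hU hn t node hw
  induction g with
  | zero => omega
  | succ g ih =>
    rcases Nat.lt_or_ge f (g + 1) with h | h
    · have := ih (by omega)
      rw [← this]
      exact pvG_stable sales tree n hT hU hn g t node hw (by omega)
    · have : f = g + 1 := by omega
      subst this; rfl

lemma pvDfsA_succ (sales : List Int) (tree : Int → List Int) (fuel : Nat) (node : Int)
    (dp : Int → Int × Int) :
    pvDfsA sales tree (fuel + 1) node dp =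
      (let dp1 := pvUpd dp node ((dp node).1, pvSales sales node)
       let cs := tree node
       if cs = [] then dp1
       else
         let st := cs.foldl (pvFoldStep node (fun c d => pvDfsA sales tree fuel c d)) (dp1, none, true)
         if st.2.2 then pvUpd st.1 node ((st.1 node).1 + st.2.1.getD 0, (st.1 node).2) else st.1) := rfl

lemma pvDfsA_local (sales : List Int) (tree : Int → List Int) :
    ∀ (f : Nat) (node : Int) (dp : Int → Int × Int) (v : Int),
      v ∉ pvReach tree f node → pvDfsA sales tree f node dp v = dp v := by
  intro f
  induction f with
  | zero => intro node dp v _; rfl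
  | succ f ih =>
    intro node dp v hv
    have hvnode : v ≠ node := by
      rintro rfl
      exact hv (by rw [pvReach_succ]; exact List.mem_cons_self)
    have hvc : ∀ c ∈ tree node, v ∉ pvReach tree f c := by
      intro c hc hmem
      exact hv (by rw [pvReach_succ]; exact List.mem_cons_of_mem _ (List.mem_flatMap.mpr ⟨c, hc, hmem⟩))
    rw [pvDfsA_succ]
    simp only []
    have hdp1 : pvUpd dp node ((dp node).1, pvSales sales node) v = dp v := by
      simp [pvUpd, hvnode]
    have hfold : ∀ (cs : List Int) (st : (Int → Int × Int) × Option Int × Bool),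
        cs ⊆ tree node →
        (cs.foldl (pvFoldStep node (fun c d => pvDfsA sales tree f c d)) st).1 v = st.1 v := by
      intro cs
      induction cs with
      | nil => intro st _; rfl
      | cons c cs ihc =>
        intro st hss
        rw [List.foldl_cons]
        rw [ihc _ (fun y hy => hss (List.mem_cons_of_mem _ hy))]
        show (pvFoldStep node (fun c d => pvDfsA sales tree f c d) st c).1 v = st.1 v
        simp only [pvFoldStep, pvUpd]
        rw [if_neg hvnode]
        exact ih c st.1 v (hvc c (hss List.mem_cons_self))
    by_cases hcs : tree node = []
    · rw [if_pos hcs]; exact hdp1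
    · rw [if_neg hcs]
      by_cases hall : ((tree node).foldl (pvFoldStep node (fun c d => pvDfsA sales tree f c d))
          (pvUpd dp node ((dp node).1, pvSales sales node), none, true)).2.2
      · rw [if_pos hall]
        simp only [pvUpd]
        rw [if_neg hvnode]
        rw [hfold _ _ (fun y hy => hy)]
        exact hdp1
      · rw [if_neg hall]
        rw [hfold _ _ (fun y hy => hy)]
        exact hdp1

-- running state of A's child loop, expressed over a value function G
def pvSsum (G : Int → Int × Int) (P : List Int) : Int :=
  (P.map (fun c => min (G c).1 (G c).2)).sum

def pvCostOf (G : Int → Int × Int) (P : List Int) : Option Int :=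
  match P with
  | [] => none
  | _ => some (pvMinL (P.map (fun c => (G c).2 - (G c).1)))

def pvAllOf (G : Int → Int × Int) (P : List Int) : Bool :=
  P.all (fun c => (G c).1 ≤ (G c).2)

lemma pvMinL_snoc (x : Int) (xs : List Int) (y : Int) :
    pvMinL (x :: (xs ++ [y])) = min (pvMinL (x :: xs)) y := by
  simp [pvMinL, List.foldl_append]

lemma pvSsum_snoc (G : Int → Int × Int) (P : List Int) (c : Int) :
    pvSsum G (P ++ [c]) = pvSsum G P + min (G c).1 (G c).2 := by
  simp [pvSsum]

lemma pvCostOf_snoc (G : Int → Int × Int) (P : List Int) (c : Int) :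
    (match pvCostOf G P with
      | none => some ((G c).2 - (G c).1)
      | some m => some (min m ((G c).2 - (G c).1))) = pvCostOf G (P ++ [c]) := by
  cases P with
  | nil => simp [pvCostOf, pvMinL]
  | cons p ps => simp [pvCostOf, pvMinL_snoc]

lemma pvAllOf_snoc (G : Int → Int × Int) (P : List Int) (c : Int) :
    (if (G c).1 > (G c).2 then false else pvAllOf G P) = pvAllOf G (P ++ [c]) := by
  by_cases h : (G c).2 < (G c).1 <;> simp [pvAllOf, h] <;> omega

lemma pvFoldA_inv (sales : List Int) (tree : Int → List Int) (n : Int) (F : Nat)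
    (hT : ∀ x c, c ∈ tree x → 1 ≤ c ∧ c ≤ n ∧ c ≠ 1) (hU : pvUniq tree) (hn : 1 ≤ n)
    (f' : Nat) (t : List Int) (node : Int) (hw : pvWStep tree 1 t node)
    (dp0 : Int → Int × Int)
    (hz : ∀ v ∈ pvReach tree (f' + 1) node, (dp0 v).1 = 0)
    (hfn : (n - 1 - (t.length : Int)).toNat ≤ f')
    (IH : ∀ (c : Int) (dp : Int → Int × Int) (tc : List Int), pvWStep tree 1 tc c →
       (n - (tc.length : Int)).toNat ≤ f' →
       (∀ v ∈ pvReach tree f' c, (dp v).1 = 0) →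
       ∀ v ∈ pvReach tree f' c, pvDfsA sales tree f' c dp v = pvG sales tree F v) :
    ∀ (Q P : List Int) (dpS : Int → Int × Int),
      tree node = P ++ Q →
      (∀ v ∈ P.flatMap (fun c => pvReach tree f' c), dpS v = pvG sales tree F v) →
      dpS node = (pvSsum (pvG sales tree F) P,
                  pvSales sales node + pvSsum (pvG sales tree F) P) →
      (∀ v, v ≠ node → v ∉ P.flatMap (fun c => pvReach tree f' c) → dpS v = dp0 v) →
      ((∀ v ∈ (tree node).flatMap (fun c => pvReach tree f' c),
          (Q.foldl (pvFoldStep node (fun c d => pvDfsA sales tree f' c d))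
            (dpS, pvCostOf (pvG sales tree F) P, pvAllOf (pvG sales tree F) P)).1 v
            = pvG sales tree F v) ∧
       (Q.foldl (pvFoldStep node (fun c d => pvDfsA sales tree f' c d))
            (dpS, pvCostOf (pvG sales tree F) P, pvAllOf (pvG sales tree F) P)).1 node
          = (pvSsum (pvG sales tree F) (tree node),
             pvSales sales node + pvSsum (pvG sales tree F) (tree node)) ∧
       (∀ v, v ≠ node → v ∉ (tree node).flatMap (fun c => pvReach tree f' c) →
          (Q.foldl (pvFoldStep node (fun c d => pvDfsA sales tree f' c d))
            (dpS, pvCostOf (pvG sales tree F) P, pvAllOf (pvG sales tree F) P)).1 v = dp0 v) ∧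
       (Q.foldl (pvFoldStep node (fun c d => pvDfsA sales tree f' c d))
            (dpS, pvCostOf (pvG sales tree F) P, pvAllOf (pvG sales tree F) P)).2.1
          = pvCostOf (pvG sales tree F) (tree node) ∧
       (Q.foldl (pvFoldStep node (fun c d => pvDfsA sales tree f' c d))
            (dpS, pvCostOf (pvG sales tree F) P, pvAllOf (pvG sales tree F) P)).2.2
          = pvAllOf (pvG sales tree F) (tree node)) := by
  intro Q
  induction Q with
  | nil =>
    intro P dpS htree h1 h2 h3
    have hP : P = tree node := by rw [htree, List.append_nil]
    subst hP
    exact ⟨h1, h2, h3, rfl, rfl⟩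
  | cons c Q' ih =>
    intro P dpS htree h1 h2 h3
    have hcmem : c ∈ tree node := by
      rw [htree]; exact List.mem_append.mpr (Or.inr List.mem_cons_self)
    have hwc : pvWStep tree 1 (t ++ [c]) c := pvWalk_child tree t node c hw hcmem
    have hdc := pvDepth_le tree n hT hU hn (t ++ [c]) c hwc
    rw [List.length_append, List.length_singleton] at hdc
    push_cast at hdc
    have hfc : (n - ((t ++ [c]).length : Int)).toNat ≤ f' := by
      rw [List.length_append, List.length_singleton]; push_cast; omega
    have hf'pos : 1 ≤ f' := by omega
    have hndtree := hU.1 node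
    have hcP : c ∉ P := by
      rw [htree] at hndtree
      intro hc
      exact (List.nodup_append.mp hndtree).2.2 c hc c List.mem_cons_self rfl
    have hPmem : ∀ p ∈ P, p ∈ tree node := by
      intro p hp; rw [htree]; exact List.mem_append.mpr (Or.inl hp)
    have hnotP : ∀ v ∈ pvReach tree f' c, v ∉ P.flatMap (fun c' => pvReach tree f' c') := by
      intro v hv hvP
      obtain ⟨c', hc', hvc'⟩ := List.mem_flatMap.mp hvP
      exact pvDisj tree n hT hU t node c c' f' f' v hw hcmem (hPmem c' hc')
        (by rintro rfl; exact hcP hc') hv hvc'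
    have hvnode : ∀ v ∈ pvReach tree f' c, v ≠ node := by
      intro v hv
      exact pvNotSelf tree n hT hU t node c hw hcmem f' v hv
    have hzc : ∀ v ∈ pvReach tree f' c, (dpS v).1 = 0 := by
      intro v hv
      rw [h3 v (hvnode v hv) (hnotP v hv)]
      apply hz
      rw [pvReach_succ]
      exact List.mem_cons_of_mem _ (List.mem_flatMap.mpr ⟨c, hcmem, hv⟩)
    have hval : ∀ v ∈ pvReach tree f' c, pvDfsA sales tree f' c dpS v = pvG sales tree F v :=
      IH c dpS (t ++ [c]) hwc hfc hzc
    have hloc : ∀ (v : Int), v ∉ pvReach tree f' c → pvDfsA sales tree f' c dpS v = dpS v :=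
      fun v hv => pvDfsA_local sales tree f' c dpS v hv
    have hcself : c ∈ pvReach tree f' c := by
      obtain ⟨f₁, rfl⟩ : ∃ f₁, f' = f₁ + 1 := ⟨f' - 1, by omega⟩
      rw [pvReach_succ]; exact List.mem_cons_self
    have hnodenotin : node ∉ pvReach tree f' c := by
      intro h
      exact pvNotSelf tree n hT hU t node c hw hcmem f' node h rfl
    have hdp'c : pvDfsA sales tree f' c dpS c = pvG sales tree F c := hval c hcself
    rw [List.foldl_cons]
    have hstep : pvFoldStep node (fun c d => pvDfsA sales tree f' c d)
        (dpS, pvCostOf (pvG sales tree F) P, pvAllOf (pvG sales tree F) P) c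
        = (pvUpd (pvDfsA sales tree f' c dpS) node
             ((pvDfsA sales tree f' c dpS node).1 + min (pvG sales tree F c).1 (pvG sales tree F c).2,
              (pvDfsA sales tree f' c dpS node).2 + min (pvG sales tree F c).1 (pvG sales tree F c).2),
           pvCostOf (pvG sales tree F) (P ++ [c]), pvAllOf (pvG sales tree F) (P ++ [c])) := by
      simp only [pvFoldStep]
      have hc2 : pvUpd (pvDfsA sales tree f' c dpS) node
          ((pvDfsA sales tree f' c dpS node).1 + min ((pvDfsA sales tree f' c dpS) c).1 ((pvDfsA sales tree f' c dpS) c).2,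
           (pvDfsA sales tree f' c dpS node).2 + min ((pvDfsA sales tree f' c dpS) c).1 ((pvDfsA sales tree f' c dpS) c).2) c
          = pvDfsA sales tree f' c dpS c := by
        simp [pvUpd]
        intro hh
        exact absurd hh (hvnode c hcself)
      rw [hdp'c] at hc2 ⊢
      rw [hc2]
      exact Prod.ext rfl (Prod.ext (pvCostOf_snoc _ _ _) (pvAllOf_snoc _ _ _))
    rw [hstep]
    have hdpnode : pvDfsA sales tree f' c dpS node = dpS node := hloc node hnodenotin
    have htree' : tree node = (P ++ [c]) ++ Q' := by rw [htree]; simp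
    refine ih (P ++ [c])
      (pvUpd (pvDfsA sales tree f' c dpS) node
        ((pvDfsA sales tree f' c dpS node).1 + min (pvG sales tree F c).1 (pvG sales tree F c).2,
         (pvDfsA sales tree f' c dpS node).2 + min (pvG sales tree F c).1 (pvG sales tree F c).2))
      htree' ?_ ?_ ?_
    · intro v hv
      rw [List.flatMap_append] at hv
      have hvne : v ≠ node := by
        rcases List.mem_append.mp hv with hvl | hvr
        · obtain ⟨c', hc', hvc'⟩ := List.mem_flatMap.mp hvl
          exact pvNotSelf tree n hT hU t node c' hw (hPmem c' hc') f' v hvc'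
        · simp only [List.flatMap_cons, List.flatMap_nil, List.append_nil] at hvr
          exact hvnode v hvr
      show pvUpd _ node _ v = _
      simp only [pvUpd, if_neg hvne]
      rcases List.mem_append.mp hv with hvl | hvr
      · by_cases hvc : v ∈ pvReach tree f' c
        · exact hval v hvc
        · rw [hloc v hvc]; exact h1 v hvl
      · simp only [List.flatMap_cons, List.flatMap_nil, List.append_nil] at hvr
        exact hval v hvr
    · show pvUpd _ node _ node = _
      simp only [pvUpd, if_pos rfl]
      rw [hdpnode, h2]
      rw [pvSsum_snoc]
      refine Prod.ext rfl ?_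
      show pvSales sales node + pvSsum (pvG sales tree F) P + _ = _
      rw [add_assoc]
    · intro v hvne hvout
      show pvUpd _ node _ v = _
      simp only [pvUpd, if_neg hvne]
      have hvnotc : v ∉ pvReach tree f' c := by
        intro hvc
        apply hvout
        rw [List.flatMap_append]
        refine List.mem_append.mpr (Or.inr ?_)
        simp only [List.flatMap_cons, List.flatMap_nil, List.append_nil]
        exact hvc
      rw [hloc v hvnotc]
      refine h3 v hvne ?_
      intro hvP
      exact hvout (by rw [List.flatMap_append]; exact List.mem_append.mpr (Or.inl hvP))

lemma pvCostOf_ne_nil (G : Int → Int × Int) (P : List Int) (h : P ≠ []) :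
    pvCostOf G P = some (pvMinL (P.map (fun c => (G c).2 - (G c).1))) := by
  cases P with
  | nil => exact absurd rfl h
  | cons p ps => rfl

lemma pvDfsA_val (sales : List Int) (tree : Int → List Int) (n : Int) (F : Nat)
    (hT : ∀ x c, c ∈ tree x → 1 ≤ c ∧ c ≤ n ∧ c ≠ 1) (hU : pvUniq tree) (hn : 1 ≤ n)
    (hF : n < (F : Int)) :
    ∀ (f : Nat) (t : List Int) (node : Int) (dp : Int → Int × Int),
      pvWStep tree 1 t node → (n - (t.length : Int)).toNat ≤ f →
      (∀ v ∈ pvReach tree f node, (dp v).1 = 0) →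
      ∀ v ∈ pvReach tree f node, pvDfsA sales tree f node dp v = pvG sales tree F v := by
  intro f
  induction f using Nat.strong_induction_on with
  | _ f ihf =>
    intro t node dp hw hf hz v hv
    have hd := pvDepth_le tree n hT hU hn t node hw
    obtain ⟨f', rfl⟩ : ∃ f', f = f' + 1 := ⟨f - 1, by omega⟩
    obtain ⟨F₁, rfl⟩ : ∃ F₁, F = F₁ + 1 := ⟨F - 1, by omega⟩
    have hnF : n ≤ (F₁ : Int) := by push_cast at hF; omega
    have hGnode : pvG sales tree (F₁ + 1) node =
        (if tree node = [] then (0, pvSales sales node)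
         else
           ((((tree node).map (fun c => pvG sales tree (F₁ + 1) c)).map (fun p => min p.1 p.2)).sum +
              (if ((tree node).map (fun c => pvG sales tree (F₁ + 1) c)).all (fun p => p.1 ≤ p.2) then
                pvMinL ((((tree node).map (fun c => pvG sales tree (F₁ + 1) c)).map (fun p => p.2 - p.1)))
               else 0),
            pvSales sales node +
              (((tree node).map (fun c => pvG sales tree (F₁ + 1) c)).map (fun p => min p.1 p.2)).sum)) := by
      rw [pvG_succ]
      have hmc : (tree node).map (fun c => pvG sales tree F₁ c)
          = (tree node).map (fun c => pvG sales tree (F₁ + 1) c) := by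
        apply List.map_congr_left
        intro c hc
        exact (pvG_eq_of_le sales tree n hT hU hn (t ++ [c]) c
          (pvWalk_child tree t node c hw hc) F₁ (F₁ + 1)
          (by rw [List.length_append, List.length_singleton]; push_cast; omega)
          (by omega)).symm
      simp only [hmc]
    rw [pvDfsA_succ]
    simp only []
    by_cases hcs : tree node = []
    · rw [if_pos hcs]
      rw [pvReach_succ, hcs] at hv
      simp at hv
      subst hv
      have hG0 : pvG sales tree (F₁ + 1) v = (0, pvSales sales v) := by
        rw [hGnode, if_pos hcs]
      rw [hG0]
      have hdpn : (dp v).1 = 0 := hz v (by rw [pvReach_succ]; exact List.mem_cons_self)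
      simp [pvUpd, hdpn]
    · rw [if_neg hcs]
      have hIH : ∀ (c : Int) (dpc : Int → Int × Int) (tc : List Int), pvWStep tree 1 tc c →
          (n - (tc.length : Int)).toNat ≤ f' →
          (∀ w ∈ pvReach tree f' c, (dpc w).1 = 0) →
          ∀ w ∈ pvReach tree f' c, pvDfsA sales tree f' c dpc w = pvG sales tree (F₁ + 1) w :=
        fun c dpc tc hc1 hc2 hc3 => ihf f' (by omega) tc c dpc hc1 hc2 hc3
      have hdpn : (dp node).1 = 0 := hz node (by rw [pvReach_succ]; exact List.mem_cons_self)
      have hstart2 : pvUpd dp node ((dp node).1, pvSales sales node) node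
          = (pvSsum (pvG sales tree (F₁ + 1)) [],
             pvSales sales node + pvSsum (pvG sales tree (F₁ + 1)) []) := by
        simp [pvUpd, pvSsum, hdpn]
    -- invoke the loop invariant with P = [], Q = tree node
      obtain ⟨H1, H2, H3, H4, H5⟩ := pvFoldA_inv sales tree n (F₁ + 1) hT hU hn f' t node hw dp hz
        (by omega) hIH (tree node) [] (pvUpd dp node ((dp node).1, pvSales sales node))
        (by simp) (by simp) hstart2 (fun w hw' _ => by simp [pvUpd, hw'])
      have H1' : ∀ w ∈ (tree node).flatMap (fun c => pvReach tree f' c),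
          ((tree node).foldl (pvFoldStep node (fun c d => pvDfsA sales tree f' c d))
            (pvUpd dp node ((dp node).1, pvSales sales node), none, true)).1 w
            = pvG sales tree (F₁ + 1) w := H1
      have H2' : ((tree node).foldl (pvFoldStep node (fun c d => pvDfsA sales tree f' c d))
            (pvUpd dp node ((dp node).1, pvSales sales node), none, true)).1 node
            = (pvSsum (pvG sales tree (F₁ + 1)) (tree node),
               pvSales sales node + pvSsum (pvG sales tree (F₁ + 1)) (tree node)) := H2
      have H4' : ((tree node).foldl (pvFoldStep node (fun c d => pvDfsA sales tree f' c d))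
            (pvUpd dp node ((dp node).1, pvSales sales node), none, true)).2.1
            = pvCostOf (pvG sales tree (F₁ + 1)) (tree node) := H4
      have H5' : ((tree node).foldl (pvFoldStep node (fun c d => pvDfsA sales tree f' c d))
            (pvUpd dp node ((dp node).1, pvSales sales node), none, true)).2.2
            = pvAllOf (pvG sales tree (F₁ + 1)) (tree node) := H5
      have e1 : (((tree node).map (fun c => pvG sales tree (F₁ + 1) c)).map (fun p => min p.1 p.2)).sum
          = pvSsum (pvG sales tree (F₁ + 1)) (tree node) := by
        simp only [List.map_map]; rfl
      have e2 : ((tree node).map (fun c => pvG sales tree (F₁ + 1) c)).all (fun p => p.1 ≤ p.2)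
          = pvAllOf (pvG sales tree (F₁ + 1)) (tree node) := by
        simp only [List.all_map]; rfl
      have e3 : ((tree node).map (fun c => pvG sales tree (F₁ + 1) c)).map (fun p => p.2 - p.1)
          = (tree node).map (fun c => (pvG sales tree (F₁ + 1) c).2 - (pvG sales tree (F₁ + 1) c).1) := by
        simp only [List.map_map]; rfl
      rw [pvReach_succ] at hv
      rcases List.mem_cons.mp hv with rfl | hvtail
      · rw [H5', hGnode, if_neg hcs, e1, e2, e3]
        by_cases hall : pvAllOf (pvG sales tree (F₁ + 1)) (tree v) = true
        · rw [if_pos hall, if_pos hall]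
          show pvUpd _ v _ v = _
          simp only [pvUpd, if_pos rfl]
          rw [H2', H4', pvCostOf_ne_nil _ _ hcs]
          rfl
        · rw [if_neg hall, if_neg hall]
          rw [H2']
          rw [add_zero]
      · have hvne : v ≠ node := by
          obtain ⟨c', hc', hvc'⟩ := List.mem_flatMap.mp hvtail
          exact pvNotSelf tree n hT hU t node c' hw hc' f' v hvc'
        rw [H5']
        by_cases hall : pvAllOf (pvG sales tree (F₁ + 1)) (tree node) = true
        · rw [if_pos hall]
          show pvUpd _ node _ v = _
          simp only [pvUpd, if_neg hvne]
          exact H1' v hvtail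
        · rw [if_neg hall]
          exact H1' v hvtail

lemma pvNum_pos (sales : List Int) (h : sales ≠ []) : 1 ≤ (sales.length : Int) := by
  have h0 : sales.length ≠ 0 := fun hh => h (List.length_eq_zero_iff.mp hh)
  omega

lemma pvPre_hT (sales : List Int) (links : List (List Int))
    (hshape : ∀ l ∈ links, 1 ≤ l.getD 1 0 ∧ l.getD 1 0 ≤ (sales.length : Int) ∧ l.getD 1 0 ≠ 1) :
    ∀ x c, c ∈ pvTreeA links x → 1 ≤ c ∧ c ≤ (sales.length : Int) ∧ c ≠ 1 := by
  intro x c hmem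
  have hl : [x, c] ∈ links := (pvMem_tree links x c).mp hmem
  have := hshape _ hl
  exact this

lemma pvFilterPick_nodup (links : List (List Int)) (x : Int)
    (h : (links.map (fun l => l.getD 1 0)).Nodup) : (links.filterMap (pvPick x)).Nodup := by
  induction links with
  | nil => simp
  | cons l ls ih =>
    rw [List.map_cons, List.nodup_cons] at h
    rw [List.filterMap_cons]
    cases hp : pvPick x l with
    | none => exact ih h.2
    | some c =>
      refine List.nodup_cons.mpr ⟨?_, ih h.2⟩
      intro hc
      obtain ⟨l', hl', hp'⟩ := List.mem_filterMap.mp hc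
      have hlc := pvPick_eq_some x c l hp
      have hl'c := pvPick_eq_some x c l' hp'
      apply h.1
      refine List.mem_map.mpr ⟨l', hl', ?_⟩
      rw [hl'c, hlc]

lemma pvPre_uniq (links : List (List Int))
    (hnd : (links.map (fun l => l.getD 1 0)).Nodup) :
    pvUniq (pvTreeA links) := by
  refine ⟨?_, ?_⟩
  · intro x
    unfold pvTreeA
    rw [pvTree_go]
    simp only [List.nil_append]
    exact pvFilterPick_nodup links x hnd
  · intro x y c hx hy
    have h1 := (pvMem_tree links x c).mp hx
    have h2 := (pvMem_tree links y c).mp hy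
    have heq := List.inj_on_of_nodup_map hnd h1 h2
      (by rfl : ([x, c] : List Int).getD 1 0 = ([y, c] : List Int).getD 1 0)
    injection heq

lemma pvSolA (sales : List Int) (links : List (List Int)) (hne : sales ≠ [])
    (hshape : ∀ l ∈ links, 1 ≤ l.getD 1 0 ∧ l.getD 1 0 ≤ (sales.length : Int) ∧ l.getD 1 0 ≠ 1)
    (hnd : (links.map (fun l => l.getD 1 0)).Nodup) :
    solution sales links
      = min (pvG sales (pvTreeA links) (sales.length + 1) 1).1
            (pvG sales (pvTreeA links) (sales.length + 1) 1).2 := by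
  have hn1 : 1 ≤ (sales.length : Int) := pvNum_pos sales hne
  have hT := pvPre_hT sales links hshape
  have hU := pvPre_uniq links hnd
  have h11 : (1 : Int) ∈ pvReach (pvTreeA links) (sales.length + 1) 1 := by
    rw [pvReach_succ]; exact List.mem_cons_self
  have hw1 : pvWStep (pvTreeA links) 1 [] 1 := rfl
  have hval := pvDfsA_val sales (pvTreeA links) (sales.length : Int) (sales.length + 1) hT hU hn1
    (by push_cast; omega) (sales.length + 1) [] 1 (fun _ => (0, 0)) hw1
    (by simp) (fun _ _ => rfl) 1 h11
  unfold solution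
  simp only []
  rw [hval]

lemma pvAll_congr (p q : Int → Bool) :
    ∀ (l : List Int), (∀ c ∈ l, p c = q c) → l.all p = l.all q := by
  intro l h
  induction l with
  | nil => rfl
  | cons a l ih =>
    simp only [List.all_cons]
    rw [h a List.mem_cons_self, ih (fun c hc => h c (List.mem_cons_of_mem _ hc))]

lemma pvBfs_acc (tree : Int → List Int) :
    ∀ (f : Nat) (q acc : List Int), pvBfs tree f q acc = acc ++ pvBfs tree f q [] := by
  intro f
  induction f with
  | zero => intro q acc; simp [pvBfs]
  | succ f ih =>
    intro q acc
    cases q with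
    | nil => simp [pvBfs]
    | cons node rest =>
      show pvBfs tree f (rest ++ tree node) (acc ++ [node])
          = acc ++ pvBfs tree f (rest ++ tree node) ([] ++ [node])
      rw [ih (rest ++ tree node) (acc ++ [node]), ih (rest ++ tree node) ([] ++ [node])]
      simp

lemma pvG_unfold (sales : List Int) (tree : Int → List Int) (n : Int)
    (hT : ∀ x c, c ∈ tree x → 1 ≤ c ∧ c ≤ n ∧ c ≠ 1) (hU : pvUniq tree) (hn : 1 ≤ n)
    (t : List Int) (node : Int) (hw : pvWStep tree 1 t node) :
    pvG sales tree (n.toNat + 1) node =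
      (if tree node = [] then (0, pvSales sales node)
       else
         (pvSsum (pvG sales tree (n.toNat + 1)) (tree node) +
            (if pvAllOf (pvG sales tree (n.toNat + 1)) (tree node) then
               pvMinL ((tree node).map
                 (fun c => (pvG sales tree (n.toNat + 1) c).2 - (pvG sales tree (n.toNat + 1) c).1))
             else 0),
          pvSales sales node + pvSsum (pvG sales tree (n.toNat + 1)) (tree node))) := by
  rw [pvG_succ]
  have hmc : (tree node).map (fun c => pvG sales tree n.toNat c)
      = (tree node).map (fun c => pvG sales tree (n.toNat + 1) c) := by
    apply List.map_congr_left
    intro c hc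
    exact (pvG_eq_of_le sales tree n hT hU hn (t ++ [c]) c (pvWalk_child tree t node c hw hc)
      n.toNat (n.toNat + 1)
      (by rw [List.length_append, List.length_singleton]; push_cast; omega) (by omega)).symm
  simp only [hmc, List.map_map, List.all_map]
  rfl

lemma pvStepB_def (sales : List Int) (tree : Int → List Int) (dp : Int → Int × Int) (node : Int) :
    pvStepB sales tree dp node =
      pvUpd dp node
        (if tree node ≠ [] ∧ (tree node).all (fun c => (dp c).1 ≤ (dp c).2) then
            ((tree node).map (fun c => min (dp c).1 (dp c).2)).sum +
              pvMinL ((tree node).map (fun c => (dp c).2 - (dp c).1))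
          else ((tree node).map (fun c => min (dp c).1 (dp c).2)).sum,
         pvSales sales node + ((tree node).map (fun c => min (dp c).1 (dp c).2)).sum) := rfl

lemma pvRch_self (tree : Int → List Int) (f : Nat) (c : Int) :
    c ∈ pvReach tree (f + 1) c := by
  rw [pvReach_succ]; exact List.mem_cons_self

lemma pvLB (sales : List Int) (tree : Int → List Int) (n : Int)
    (hT : ∀ x c, c ∈ tree x → 1 ≤ c ∧ c ≤ n ∧ c ≠ 1) (hU : pvUniq tree) (hn : 1 ≤ n) :
    ∀ (f : Nat) (q : List Int) (dp0 : Int → Int × Int),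
      (∀ c ∈ q, ∃ t, pvWStep tree 1 t c) →
      (q.flatMap (fun c => pvReach tree (n.toNat + 1) c)).Nodup →
      (q.flatMap (fun c => pvReach tree (n.toNat + 1) c)).length ≤ f →
      ∀ c ∈ q, ∀ v ∈ pvReach tree (n.toNat + 1) c,
        (List.foldr (fun node dp => pvStepB sales tree dp node) dp0 (pvBfs tree f q [])) v
          = pvG sales tree (n.toNat + 1) v := by
  intro f
  induction f with
  | zero =>
    intro q dp0 hq hnd hlen c hc v hv
    exfalso
    have hm : c ∈ q.flatMap (fun c => pvReach tree (n.toNat + 1) c) :=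
      List.mem_flatMap.mpr ⟨c, hc, pvRch_self tree n.toNat c⟩
    have := List.length_pos_of_mem hm
    omega
  | succ f ih =>
    intro q dp0 hq hnd hlen c hc v hv
    cases q with
    | nil => simp at hc
    | cons node rest =>
      obtain ⟨t, ht⟩ := hq node List.mem_cons_self
      have hord : pvBfs tree (f + 1) (node :: rest) [] = node :: pvBfs tree f (rest ++ tree node) [] := by
        show pvBfs tree f (rest ++ tree node) ([] ++ [node]) = _
        rw [pvBfs_acc tree f (rest ++ tree node) ([] ++ [node])]
        simp
      rw [hord, List.foldr_cons]
      have hq' : ∀ c' ∈ rest ++ tree node, ∃ t', pvWStep tree 1 t' c' := by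
        intro c' hc'
        rcases List.mem_append.mp hc' with hr | ht'
        · exact hq c' (List.mem_cons_of_mem _ hr)
        · exact ⟨t ++ [c'], pvWalk_child tree t node c' ht ht'⟩
      have hRchn : pvReach tree (n.toNat + 1) node
          = node :: (tree node).flatMap (fun c => pvReach tree (n.toNat + 1) c) := by
        rw [pvReach_succ]
        congr 1
        apply List.flatMap_congr
        intro c' hc'
        exact (pvReach_eq_of_le tree n hT hU hn (t ++ [c']) c'
          (pvWalk_child tree t node c' ht hc') n.toNat (n.toNat + 1)
          (by rw [List.length_append, List.length_singleton]; push_cast; omega) (by omega)).symm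
      have hsplit : (node :: rest).flatMap (fun c => pvReach tree (n.toNat + 1) c)
          = node :: ((tree node).flatMap (fun c => pvReach tree (n.toNat + 1) c)
              ++ rest.flatMap (fun c => pvReach tree (n.toNat + 1) c)) := by
        rw [List.flatMap_cons, hRchn, List.cons_append]
      rw [hsplit] at hnd hlen
      have hnd' : ((rest ++ tree node).flatMap (fun c => pvReach tree (n.toNat + 1) c)).Nodup := by
        rw [List.flatMap_append]
        exact (List.perm_append_comm).nodup (List.nodup_cons.mp hnd).2
      have hlen' : ((rest ++ tree node).flatMap (fun c => pvReach tree (n.toNat + 1) c)).length ≤ f := by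
        rw [List.flatMap_append]
        simp only [List.length_cons, List.length_append] at hlen ⊢
        omega
      have IH' := ih (rest ++ tree node) dp0 hq' hnd' hlen'
      have hchild : ∀ c' ∈ tree node,
          (List.foldr (fun node dp => pvStepB sales tree dp node) dp0
            (pvBfs tree f (rest ++ tree node) [])) c' = pvG sales tree (n.toNat + 1) c' := by
        intro c' hc'
        exact IH' c' (List.mem_append.mpr (Or.inr hc')) c' (pvRch_self tree n.toNat c')
      have hstep_node :
          pvStepB sales tree
            (List.foldr (fun node dp => pvStepB sales tree dp node) dp0
              (pvBfs tree f (rest ++ tree node) [])) node node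
            = pvG sales tree (n.toNat + 1) node := by
        rw [pvStepB_def]
        have hmin : (tree node).map (fun c =>
            min ((List.foldr (fun node dp => pvStepB sales tree dp node) dp0
              (pvBfs tree f (rest ++ tree node) [])) c).1
                ((List.foldr (fun node dp => pvStepB sales tree dp node) dp0
              (pvBfs tree f (rest ++ tree node) [])) c).2)
            = (tree node).map (fun c =>
                min (pvG sales tree (n.toNat + 1) c).1 (pvG sales tree (n.toNat + 1) c).2) := by
          apply List.map_congr_left
          intro c' hc'
          rw [hchild c' hc']
        have hall : ((tree node).all (fun c =>
            ((List.foldr (fun node dp => pvStepB sales tree dp node) dp0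
              (pvBfs tree f (rest ++ tree node) [])) c).1 ≤
            ((List.foldr (fun node dp => pvStepB sales tree dp node) dp0
              (pvBfs tree f (rest ++ tree node) [])) c).2))
            = pvAllOf (pvG sales tree (n.toNat + 1)) (tree node) := by
          apply pvAll_congr
          intro c' hc'
          rw [hchild c' hc']
        have hdel : (tree node).map (fun c =>
            ((List.foldr (fun node dp => pvStepB sales tree dp node) dp0
              (pvBfs tree f (rest ++ tree node) [])) c).2 -
            ((List.foldr (fun node dp => pvStepB sales tree dp node) dp0
              (pvBfs tree f (rest ++ tree node) [])) c).1)
            = (tree node).map (fun c =>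
                (pvG sales tree (n.toNat + 1) c).2 - (pvG sales tree (n.toNat + 1) c).1) := by
          apply List.map_congr_left
          intro c' hc'
          rw [hchild c' hc']
        simp only [hmin, hall, hdel]
        rw [pvG_unfold sales tree n hT hU hn t node ht]
        by_cases hcs : tree node = []
        · rw [if_pos hcs]
          simp [pvUpd, hcs]
        · rw [if_neg hcs]
          have hcond : (tree node ≠ [] ∧ pvAllOf (pvG sales tree (n.toNat + 1)) (tree node) = true)
              ↔ (pvAllOf (pvG sales tree (n.toNat + 1)) (tree node) = true) := by
            constructor
            · exact fun hh => hh.2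
            · exact fun hh => ⟨hcs, hh⟩
          by_cases hall2 : pvAllOf (pvG sales tree (n.toNat + 1)) (tree node) = true
          · rw [if_pos (hcond.mpr hall2), if_pos hall2]
            simp only [pvUpd, if_pos rfl]
            rfl
          · rw [if_neg (fun hh => hall2 (hcond.mp hh)), if_neg hall2]
            simp only [pvUpd, if_pos rfl]
            rw [add_zero]
            rfl
      rcases List.mem_cons.mp hc with heq | hcrest
      · rw [heq] at hv
        rw [hRchn] at hv
        rcases List.mem_cons.mp hv with heq2 | hvsub
        · rw [heq2]
          exact hstep_node
        · obtain ⟨c', hc', hvc'⟩ := List.mem_flatMap.mp hvsub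
          have hvne : v ≠ node := pvNotSelf tree n hT hU t node c' ht hc' (n.toNat + 1) v hvc'
          show pvStepB sales tree _ node v = _
          rw [pvStepB_def]
          simp only [pvUpd, if_neg hvne]
          exact IH' c' (List.mem_append.mpr (Or.inr hc')) v hvc'
      · have hvne : v ≠ node := by
          rintro rfl
          have hmem : v ∈ rest.flatMap (fun c => pvReach tree (n.toNat + 1) c) :=
            List.mem_flatMap.mpr ⟨c, hcrest, hv⟩
          exact (List.nodup_cons.mp hnd).1 (List.mem_append.mpr (Or.inr hmem))
        show pvStepB sales tree _ node v = _
        rw [pvStepB_def]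
        simp only [pvUpd, if_neg hvne]
        exact IH' c (List.mem_append.mpr (Or.inl hcrest)) v hv

lemma pvSolB (sales : List Int) (links : List (List Int)) (hne : sales ≠ [])
    (hshape : ∀ l ∈ links, 1 ≤ l.getD 1 0 ∧ l.getD 1 0 ≤ (sales.length : Int) ∧ l.getD 1 0 ≠ 1)
    (hnd : (links.map (fun l => l.getD 1 0)).Nodup) :
    solution_alt sales links
      = min (pvG sales (pvTreeA links) (sales.length + 1) 1).1
            (pvG sales (pvTreeA links) (sales.length + 1) 1).2 := by
  have hn1 : 1 ≤ (sales.length : Int) := pvNum_pos sales hne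
  have hT := pvPre_hT sales links hshape
  have hU := pvPre_uniq links hnd
  have hw1 : pvWStep (pvTreeA links) 1 [] 1 := rfl
  have htn : ((sales.length : Int)).toNat + 1 = sales.length + 1 := by omega
  have hsub : ∀ v ∈ pvReach (pvTreeA links) (sales.length + 1) 1,
      v ∈ (1 : Int) :: links.map (fun l => l.getD 1 0) := by
    intro v hv
    rcases pvReach_parent (pvTreeA links) (sales.length + 1) 1 v hv with rfl | ⟨p, hp, hvp⟩
    · exact List.mem_cons_self
    · have hl : [p, v] ∈ links := (pvMem_tree links p v).mp hvp
      exact List.mem_cons_of_mem _ (List.mem_map.mpr ⟨[p, v], hl, rfl⟩)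
  have hndR : (pvReach (pvTreeA links) (sales.length + 1) 1).Nodup :=
    pvReach_nodup (pvTreeA links) (sales.length : Int) hT hU (sales.length + 1) [] 1 hw1
  have hlenR : (pvReach (pvTreeA links) (sales.length + 1) 1).length ≤ links.length + 1 := by
    have := (List.subperm_of_subset hndR hsub).length_le
    simpa using this
  have hfin := pvLB sales (pvTreeA links) (sales.length : Int) hT hU hn1 (links.length + 1)
    [1] (fun _ => (0, 0))
    (by intro c hc; simp at hc; subst hc; exact ⟨[], rfl⟩)
    (by rw [htn]; simpa using hndR)
    (by rw [htn]; simpa using hlenR)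
    1 List.mem_cons_self 1 (by rw [htn]; exact pvRch_self (pvTreeA links) sales.length 1)
  rw [htn] at hfin
  unfold solution_alt
  have hTB : pvTreeB links = pvTreeA links := rfl
  simp only [hTB]
  rw [List.foldl_reverse]
  rw [hfin]

lemma pvTreeA_one_nil (links : List (List Int)) (h : ∀ l ∈ links, l.getD 0 0 ≠ 1) :
    pvTreeA links 1 = [] := by
  unfold pvTreeA
  rw [pvTree_go]
  simp only [List.nil_append]
  rw [List.filterMap_eq_nil_iff]
  intro l hl
  have ha := h l hl
  rcases l with _ | ⟨a, _ | ⟨b, _ | ⟨cc, l3⟩⟩⟩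
  · rfl
  · rfl
  · show (if a = 1 then some b else none) = none
    have ha' : a ≠ 1 := ha
    rw [if_neg ha']
  · rfl

lemma pvBfs_nil (tree : Int → List Int) : ∀ (m : Nat) (acc : List Int), pvBfs tree m [] acc = acc := by
  intro m acc
  cases m <;> rfl

lemma pvSolA2 (sales : List Int) (links : List (List Int)) (h1 : pvTreeA links 1 = []) :
    solution sales links = min 0 (pvSales sales 1) := by
  unfold solution
  simp only []
  rw [pvDfsA_succ]
  simp [h1, pvUpd]

lemma pvSolB2 (sales : List Int) (links : List (List Int)) (h1 : pvTreeA links 1 = []) :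
    solution_alt sales links = min 0 (pvSales sales 1) := by
  unfold solution_alt
  have hTB : pvTreeB links = pvTreeA links := rfl
  simp only [hTB]
  have hord : pvBfs (pvTreeA links) (links.length + 1) [1] [] = [1] := by
    show pvBfs (pvTreeA links) links.length ([] ++ pvTreeA links 1) ([] ++ [1]) = [1]
    rw [h1]
    exact pvBfs_nil (pvTreeA links) links.length ([] ++ [1])
  rw [hord]
  show min ((pvStepB sales (pvTreeA links) (fun _ => (0, 0)) 1) 1).1
      ((pvStepB sales (pvTreeA links) (fun _ => (0, 0)) 1) 1).2 = min 0 (pvSales sales 1)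
  rw [pvStepB_def]
  simp [pvUpd, h1]

-- ===== VERDICT (by name: the statement is the Claim_ definition above) =====
theorem solution_spec : Claim_equal_solution := by
  intro sales links _ hPre
  obtain ⟨hne, hlen2, hbr⟩ := hPre
  unfold Spec_solution
  rcases hbr with hno1 | ⟨hshape, hnd⟩
  · rw [pvSolA2 sales links (pvTreeA_one_nil links hno1),
        pvSolB2 sales links (pvTreeA_one_nil links hno1)]
  · rw [pvSolA sales links hne hshape hnd, pvSolB sales links hne hshape hnd]
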